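-- pv_equiv track=rewrite | github.com/mauboro/my_katas | triangle_of_multiples/main.py | mult_triangle_timed_out
-- ===== SOURCE A (Python) =====
-- def mult_triangle_timed_out(n):
--     res = []
--     for i in range(n + 1):
--         for a in range(1, i):
--             res.append(a * i)
--         for a in range(i, 0, -1):
--             res.append(a * i)
--
--     return [sum(res), sum(n for n in res if n % 2 == 0), sum(n for n in res if n % 2)]
-- ===== SOURCE B (Python) =====
-- def mult_triangle_timed_out(n):
--     # One pass of O(1) arithmetic per row instead of materialising the whole
--     # triangle: row i contributes i**3 in total, and its odd part (nonzero only
--     # for odd i) is i * (((i-1)//2)**2 + ((i+1)//2)**2).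
--     total = 0
--     odd = 0
--     for i in range(n + 1):
--         total += i * i * i
--         if i % 2:
--             odd += i * (((i - 1) // 2) ** 2 + ((i + 1) // 2) ** 2)
--     return [total, total - odd, odd]
-- ===== Notes on version B (the rewrite author's own statement) =====
-- stated objective: faster
-- what changed: Instead of materialising every product of the multiplication triangle in a list and summing/filtering it three times, B keeps the running total and the running odd-part sum in a single pass with constant-time closed-form arithmetic per row, returning [total, total - odd, odd].
import Mathlib
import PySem

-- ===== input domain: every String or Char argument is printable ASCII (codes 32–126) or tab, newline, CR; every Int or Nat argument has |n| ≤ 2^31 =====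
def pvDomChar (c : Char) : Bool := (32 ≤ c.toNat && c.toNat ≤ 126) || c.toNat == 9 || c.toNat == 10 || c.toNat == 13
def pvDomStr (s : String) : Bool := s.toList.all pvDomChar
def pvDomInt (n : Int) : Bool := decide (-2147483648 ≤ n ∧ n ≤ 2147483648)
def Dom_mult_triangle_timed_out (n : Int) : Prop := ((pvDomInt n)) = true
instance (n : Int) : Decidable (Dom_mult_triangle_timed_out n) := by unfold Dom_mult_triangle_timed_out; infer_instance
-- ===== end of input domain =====

-- B replaces A's materialisation of all triangle products by one constant-time
-- arithmetic accumulation per row (objective: faster; measured).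


-- ===== PORT A =====
def mult_triangle_timed_out (n : Int) : List Int :=
  let res : List Int := (PySem.List.pyRange 0 (n + 1) 1).foldl (fun res i =>
      let res := (PySem.List.pyRange 1 i 1).foldl (fun res a => res ++ [a * i]) res
      let res := (PySem.List.pyRange i 0 (-1)).foldl (fun res a => res ++ [a * i]) res
      res) []
  [res.sum,
   (res.filter (fun x => PySem.Int.mod x 2 == 0)).sum,
   (res.filter (fun x => PySem.Int.mod x 2 != 0)).sum]

-- ===== PORT B =====
def mult_triangle_timed_out_alt (n : Int) : List Int :=
  let s : Int × Int := (PySem.List.pyRange 0 (n + 1) 1).foldl (fun s i =>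
      (s.1 + i * i * i,
       if PySem.Int.mod i 2 != 0 then
         s.2 + i * ((PySem.Int.floordiv (i - 1) 2) ^ 2 + (PySem.Int.floordiv (i + 1) 2) ^ 2)
       else s.2)) (0, 0)
  [s.1, s.1 - s.2, s.2]

-- ===== PRECONDITION & SPEC =====
def Spec_mult_triangle_timed_out (n : Int) (out : List Int) : Prop := out = mult_triangle_timed_out_alt n
instance (n : Int) (out : List Int) : Decidable (Spec_mult_triangle_timed_out n out) := by unfold Spec_mult_triangle_timed_out; infer_instance

-- ===== CLAIM (what is proved, stated in full; the proofs are below) =====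
def Claim_equal_mult_triangle_timed_out : Prop := ∀ (n : Int), Dom_mult_triangle_timed_out n → Spec_mult_triangle_timed_out n (mult_triangle_timed_out n)

-- ===== LEMMAS AND PROOFS =====

-- one row of A's triangle: the products appended for a given i
def gRow (i : Int) : List Int :=
  (PySem.List.pyRange 1 i 1).map (fun a => a * i) ++
  (PySem.List.pyRange i 0 (-1)).map (fun a => a * i)

-- A's res list is the concatenation of the rows
lemma res_eq_flatMap (R : List Int) (acc : List Int) :
    R.foldl (fun res i =>
      let res := (PySem.List.pyRange 1 i 1).foldl (fun res a => res ++ [a * i]) res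
      let res := (PySem.List.pyRange i 0 (-1)).foldl (fun res a => res ++ [a * i]) res
      res) acc = acc ++ R.flatMap gRow := by
  rw [PySem.List.foldl_congr_mem R _ (fun res i => res ++ gRow i) acc ?_]
  · exact PySem.List.foldl_append_eq_flatMap gRow R acc
  · intro acc x hx
    simp only [PySem.List.foldl_append_singleton_eq_map, gRow, List.append_assoc]

lemma sum_flatMap_int (l : List Int) (g : Int → List Int) :
    (l.flatMap g).sum = (l.map (fun i => (g i).sum)).sum := by
  induction l with
  | nil => rfl
  | cons a t ih => simp [List.flatMap_cons, ih]

lemma sum_map_filter_ite (l : List Int) (p : Int → Bool) (f : Int → Int) :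
    ((l.filter p).map f).sum = (l.map (fun i => if p i then f i else 0)).sum := by
  induction l with
  | nil => rfl
  | cons a t ih => by_cases h : p a <;> simp [h, ih]

-- the ascending list [1, 2, …, t]
def asc (t : Nat) : List Int := (List.range t).map (fun k : Nat => 1 + (k : Int))

lemma asc_length (t : Nat) : (asc t).length = t := by simp [asc]

lemma asc_getElem (t i : Nat) (h : i < (asc t).length) : (asc t)[i] = (1 : Int) + i := by
  simp [asc]

lemma asc_succ (t : Nat) : asc (t + 1) = asc t ++ [(1 : Int) + t] := by
  simp [asc, List.range_succ]

lemma asc_sum (t : Nat) : 2 * (asc t).sum = t * (t + 1) := by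
  induction t with
  | zero => rfl
  | succ t ih => rw [asc_succ]; simp only [List.sum_append, List.sum_cons, List.sum_nil]
                 push_cast; push_cast at ih; linarith

lemma mod_two_ne_zero (x : Int) : (PySem.Int.mod x 2 != 0) = (x % 2 != 0) := by
  rw [PySem.Int.mod_eq_emod_of_pos (by norm_num)]

lemma asc_odd_sum (t : Nat) :
    ((asc t).filter (fun x => PySem.Int.mod x 2 != 0)).sum = (((t + 1) / 2 : Nat) : Int) ^ 2 := by
  induction t with
  | zero => rfl
  | succ t ih =>
    rw [asc_succ, List.filter_append, List.sum_append, ih]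
    by_cases ht : t % 2 = 0
    · obtain ⟨a, rfl⟩ : ∃ a, t = 2 * a := ⟨t / 2, by omega⟩
      have hm : (PySem.Int.mod ((1 : Int) + ↑(2 * a)) 2 != 0) = true := by
        rw [mod_two_ne_zero]; simp only [bne_iff_ne, ne_eq]; omega
      simp only [List.filter_cons, hm, List.filter_nil, List.sum_cons, List.sum_nil, if_true]
      have h1 : (2 * a + 1) / 2 = a := by omega
      have h2 : (2 * a + 1 + 1) / 2 = a + 1 := by omega
      rw [h1, h2]; push_cast; ring
    · obtain ⟨a, rfl⟩ : ∃ a, t = 2 * a + 1 := ⟨t / 2, by omega⟩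
      have hm : (PySem.Int.mod ((1 : Int) + ↑(2 * a + 1)) 2 != 0) = false := by
        rw [mod_two_ne_zero]; simp only [bne_eq_false_iff_eq]; omega
      simp only [List.filter_cons, hm, List.filter_nil, List.sum_nil, if_false, add_zero,
        Bool.false_eq_true]
      have h1 : (2 * a + 1 + 1) / 2 = (2 * a + 1 + 1 + 1) / 2 := by omega
      rw [h1]

lemma U_eq (m : Nat) : PySem.List.pyRange 1 (m : Int) 1 = asc (m - 1) := by
  rw [PySem.List.pyRange_one]
  have h : ((m : Int) - 1).toNat = m - 1 := by omega
  rw [h]; rfl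

lemma D_eq (m : Nat) : PySem.List.pyRange (m : Int) 0 (-1) = (asc m).reverse := by
  rcases Nat.eq_zero_or_pos m with h | h
  · subst h; rfl
  · have h0 : ¬ ((0 : Int) < -1) := by norm_num
    have h1 : ((0 : Int) < (m : Int)) := by exact_mod_cast h
    simp only [PySem.List.pyRange, if_neg (by norm_num : ¬ ((-1 : Int) = 0)), if_neg h0, if_pos h1]
    have hc : (((m : Int) - 0 + -(-1) - 1) / -(-1)).toNat = m := by norm_num
    rw [hc]
    apply List.ext_getElem
    · simp [asc_length]
    · intro i hi1 hi2
      have him : i < m := by simpa using hi1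
      rw [List.getElem_reverse, asc_getElem]
      simp only [List.getElem_map, List.getElem_range]
      rw [asc_length]
      omega

lemma row_sum (m : Nat) : (gRow (m : Int)).sum = (m : Int) * m * m := by
  unfold gRow
  rw [U_eq, D_eq, List.map_reverse, List.sum_append, List.sum_reverse,
    List.sum_map_mul_right, List.sum_map_mul_right]
  simp only [List.map_id']
  rcases m with _ | t
  · rfl
  · have h1 := asc_sum t
    have h2 := asc_sum (t + 1)
    have h3 : (2 : Int) * ((asc (t + 1 - 1)).sum * (↑(t + 1) : Int) + (asc (t + 1)).sum * ↑(t + 1))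
        = 2 * ((↑(t + 1) : Int) * ↑(t + 1) * ↑(t + 1)) := by
      simp only [Nat.add_sub_cancel]
      push_cast at h1 h2 ⊢
      linear_combination ((t : Int) + 1) * h1 + ((t : Int) + 1) * h2
    exact mul_left_cancel₀ two_ne_zero h3

lemma row_odd_sum (m : Nat) :
    ((gRow (m : Int)).filter (fun x => PySem.Int.mod x 2 != 0)).sum =
      if m % 2 = 1 then
        (m : Int) * (((m / 2 : Nat) : Int) ^ 2 + ((((m + 1) / 2 : Nat)) : Int) ^ 2)
      else 0 := by
  unfold gRow
  rw [U_eq, D_eq, List.map_reverse, List.filter_append, List.sum_append,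
    List.filter_reverse, List.sum_reverse, List.filter_map, List.filter_map]
  by_cases hm : m % 2 = 1
  · have hcong : ∀ t : Nat, (asc t).filter ((fun x => PySem.Int.mod x 2 != 0) ∘ fun a => a * ↑m)
        = (asc t).filter (fun x => PySem.Int.mod x 2 != 0) := by
      intro t
      apply List.filter_congr
      intro a _
      simp only [Function.comp_apply, mod_two_ne_zero]
      have : (a * (m : Int)) % 2 = a % 2 := by
        rw [Int.mul_emod]
        have hm2 : (m : Int) % 2 = 1 := by omega
        rw [hm2, mul_one, Int.emod_emod_of_dvd a (by norm_num)]
      rw [this]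
    rw [hcong, hcong, List.sum_map_mul_right, List.sum_map_mul_right]
    simp only [List.map_id']
    rw [asc_odd_sum, asc_odd_sum, if_pos hm]
    have h1 : (m - 1 + 1) / 2 = m / 2 := by omega
    rw [h1]
    ring
  · have hnil : ∀ t : Nat, (asc t).filter ((fun x => PySem.Int.mod x 2 != 0) ∘ fun a => a * ↑m)
        = [] := by
      intro t
      apply List.filter_eq_nil_iff.mpr
      intro a _
      simp only [Function.comp_apply, mod_two_ne_zero, bne_iff_ne, ne_eq, not_not]
      have : (a * (m : Int)) % 2 = 0 := by
        rw [Int.mul_emod]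
        have hm2 : (m : Int) % 2 = 0 := by omega
        rw [hm2, mul_zero]
        rfl
      exact this
    rw [hnil, hnil, if_neg hm]
    rfl

-- ===== VERDICT (by name: the statement is the Claim_ definition above) =====
theorem mult_triangle_timed_out_spec : Claim_equal_mult_triangle_timed_out := by
  intro n _
  unfold Spec_mult_triangle_timed_out mult_triangle_timed_out mult_triangle_timed_out_alt
  dsimp only
  rw [res_eq_flatMap, List.nil_append,
    PySem.List.foldl_prod_mk
      (f := fun s i => s + i * i * i)
      (g := fun s i => if PySem.Int.mod i 2 != 0 then
        s + i * ((PySem.Int.floordiv (i - 1) 2) ^ 2 + (PySem.Int.floordiv (i + 1) 2) ^ 2)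
      else s),
    PySem.List.foldl_add,
    PySem.List.foldl_if_eq_foldl_filter
      (p := fun i => PySem.Int.mod i 2 != 0)
      (f := fun s i => s + i * ((PySem.Int.floordiv (i - 1) 2) ^ 2 + (PySem.Int.floordiv (i + 1) 2) ^ 2)),
    PySem.List.foldl_add]
  have h1 : ((PySem.List.pyRange 0 (n + 1) 1).flatMap gRow).sum
      = ((PySem.List.pyRange 0 (n + 1) 1).map (fun i => i * i * i)).sum := by
    rw [sum_flatMap_int]
    congr 1
    apply List.map_eq_map_iff.mpr
    intro i hi
    have h0 : 0 ≤ i := (PySem.List.mem_pyRange_one.mp hi).1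
    lift i to Nat using h0 with m
    exact row_sum m
  have h3 : (((PySem.List.pyRange 0 (n + 1) 1).flatMap gRow).filter
        (fun x => PySem.Int.mod x 2 != 0)).sum
      = ((((PySem.List.pyRange 0 (n + 1) 1).filter (fun i => PySem.Int.mod i 2 != 0)).map
          (fun i => i * ((PySem.Int.floordiv (i - 1) 2) ^ 2 + (PySem.Int.floordiv (i + 1) 2) ^ 2))).sum) := by
    rw [List.filter_flatMap, sum_flatMap_int, sum_map_filter_ite]
    congr 1
    apply List.map_eq_map_iff.mpr
    intro i hi
    have h0 : 0 ≤ i := (PySem.List.mem_pyRange_one.mp hi).1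
    lift i to Nat using h0 with m
    rw [row_odd_sum m]
    by_cases hm : m % 2 = 1
    · have hc : (PySem.Int.mod (m : Int) 2 != 0) = true := by
        rw [mod_two_ne_zero]; simp only [bne_iff_ne, ne_eq]; omega
      rw [if_pos hm, hc, if_pos rfl]
      have e1 : (m : Int) - 1 = ((m - 1 : Nat) : Int) := by omega
      have e2 : (m : Int) + 1 = ((m + 1 : Nat) : Int) := by omega
      have f1 : PySem.Int.floordiv (((m - 1 : Nat)) : Int) 2 = (((m - 1) / 2 : Nat) : Int) := by
        exact_mod_cast PySem.Int.floordiv_natCast (m - 1) 2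
      have f2 : PySem.Int.floordiv (((m + 1 : Nat)) : Int) 2 = (((m + 1) / 2 : Nat) : Int) := by
        exact_mod_cast PySem.Int.floordiv_natCast (m + 1) 2
      rw [e1, e2, f1, f2]
      have e3 : (m - 1) / 2 = m / 2 := by omega
      rw [e3]
    · have hc : (PySem.Int.mod (m : Int) 2 != 0) = false := by
        rw [mod_two_ne_zero]; simp only [bne_eq_false_iff_eq]; omega
      rw [if_neg hm, hc]
      simp
  have h2 : (((PySem.List.pyRange 0 (n + 1) 1).flatMap gRow).filter
        (fun x => PySem.Int.mod x 2 == 0)).sum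
      = ((PySem.List.pyRange 0 (n + 1) 1).flatMap gRow).sum
        - (((PySem.List.pyRange 0 (n + 1) 1).flatMap gRow).filter
            (fun x => PySem.Int.mod x 2 != 0)).sum := by
    have hp := (List.filter_append_perm (fun x => PySem.Int.mod x 2 == 0)
      ((PySem.List.pyRange 0 (n + 1) 1).flatMap gRow)).sum_eq
    rw [List.sum_append] at hp
    have hq : ((PySem.List.pyRange 0 (n + 1) 1).flatMap gRow).filter
        (fun x => !(PySem.Int.mod x 2 == 0))
        = ((PySem.List.pyRange 0 (n + 1) 1).flatMap gRow).filter
            (fun x => PySem.Int.mod x 2 != 0) := rfl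
    rw [hq] at hp
    omega
  simp only [h2, h3, h1, zero_add]
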